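-- pv_equiv track=rewrite | github.com/adampachucki/superextra-landing | agent/superextra_agent/notes.py | _strip_query_prefixes
-- ===== SOURCE A (Python) =====
-- _QUERY_CONTEXT_PREFIXES = ("[Date:", "[Context:")
--
-- def _strip_query_prefixes(text: str) -> str:
--     """Remove agentStream-added [Date: ...] and [Context: ...] prefixes so the
--     fallback title isn't just "[Date: 2026-04-20]"."""
--     cleaned = text
--     while True:
--         cleaned = cleaned.lstrip()
--         if not any(cleaned.startswith(p) for p in _QUERY_CONTEXT_PREFIXES):
--             break
--         end = cleaned.find("]")
--         if end == -1:
--             break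
--         cleaned = cleaned[end + 1 :]
--     return cleaned.strip()
-- ===== SOURCE B (Python) =====
-- def _strip_query_prefixes(text: str) -> str:
--     # Index-based scan: track a cursor instead of repeatedly re-slicing the string;
--     # only one final slice is taken.
--     i, n = 0, len(text)
--     while True:
--         j = i
--         while j < n and text[j].isspace():
--             j += 1
--         if not (text.startswith("[Date:", j) or text.startswith("[Context:", j)):
--             break
--         k = text.find("]", j)
--         if k == -1:
--             break
--         i = k + 1
--     return text[i:].strip()
-- ===== Notes on version B (the rewrite author's own statement) =====
-- stated objective: alternative
-- what changed: Replaced A's loop that repeatedly lstrips and re-slices the string with a single cursor-advancing index scan (startswith/find with a start offset) that takes one final slice, building no intermediate strings.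
import Mathlib
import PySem

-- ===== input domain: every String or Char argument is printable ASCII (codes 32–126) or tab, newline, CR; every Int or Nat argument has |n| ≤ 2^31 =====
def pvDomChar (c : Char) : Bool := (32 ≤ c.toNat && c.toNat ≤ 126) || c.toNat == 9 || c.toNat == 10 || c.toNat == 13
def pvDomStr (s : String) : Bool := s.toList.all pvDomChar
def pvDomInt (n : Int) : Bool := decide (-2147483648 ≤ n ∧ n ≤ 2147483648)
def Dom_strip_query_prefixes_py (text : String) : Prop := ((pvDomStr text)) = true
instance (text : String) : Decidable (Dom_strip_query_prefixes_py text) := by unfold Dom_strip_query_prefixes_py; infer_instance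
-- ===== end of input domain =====

-- B replaces A's repeated lstrip/re-slice loop by a single cursor-advancing index scan
-- (one final slice); objective: alternative (no intermediate strings are built).

-- ===== PORT A =====
-- while True: cleaned = cleaned.lstrip(); if not any(startswith): break;
--             end = cleaned.find("]"); if end == -1: break; cleaned = cleaned[end+1:]
def stripA_loop (cleaned : List Char) : List Char :=
  if (PySem.Chars.startswith (PySem.Chars.lstrip cleaned) "[Date:".toList ||
      PySem.Chars.startswith (PySem.Chars.lstrip cleaned) "[Context:".toList) = false then
    PySem.Chars.lstrip cleaned
  else
    if PySem.Chars.find (PySem.Chars.lstrip cleaned) "]".toList = -1 then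
      PySem.Chars.lstrip cleaned
    else
      stripA_loop (PySem.Chars.slice (PySem.Chars.lstrip cleaned)
        (some (PySem.Chars.find (PySem.Chars.lstrip cleaned) "]".toList + 1)) none)
termination_by cleaned.length
decreasing_by
  rename_i hsw he
  have hsw' : (PySem.Chars.startswith (PySem.Chars.lstrip cleaned) "[Date:".toList ||
      PySem.Chars.startswith (PySem.Chars.lstrip cleaned) "[Context:".toList) ≠ false := hsw
  have hc : PySem.Chars.lstrip cleaned ≠ [] := by
    intro hnil
    rw [hnil] at hsw'
    revert hsw'
    decide
  have hneg := PySem.Chars.neg_one_le_find (PySem.Chars.lstrip cleaned) "]".toList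
  have he0 : 0 ≤ PySem.Chars.find (PySem.Chars.lstrip cleaned) "]".toList := by omega
  have hlen : (PySem.Chars.lstrip cleaned).length ≤ cleaned.length := by
    simpa [PySem.Chars.lstrip] using List.length_dropWhile_le PySem.Chars.isspace cleaned
  have hpos : 0 < (PySem.Chars.lstrip cleaned).length := List.length_pos_iff.mpr hc
  rw [PySem.Chars.slice_eq_listSlice, PySem.List.slice_from _ (by omega)]
  simp only [List.length_drop]
  omega

def strip_query_prefixes_py (text : String) : String :=
  String.ofList (PySem.Chars.strip (stripA_loop text.toList))

-- ===== PORT B =====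
-- inner `while j < n and text[j].isspace(): j += 1` (n = len(text); the guard keeps the
-- index in range, so text[j] is the plain getElem — exact there)
def stripB_skipWs (text : List Char) (j : Nat) : Nat :=
  if h : j < text.length then
    if PySem.Chars.isspace text[j] then stripB_skipWs text (j + 1) else j
  else j
termination_by text.length - j

theorem stripB_skipWs_ge (text : List Char) (j : Nat) : j ≤ stripB_skipWs text j := by
  fun_induction stripB_skipWs text j with
  | case1 j h hsp ih => omega
  | case2 j h hsp => omega
  | case3 j h => omega

-- outer loop: advance the cursor i past each "[Date:…]"/"[Context:…]" prefix;
-- text.startswith(p, j) ported as a prefix test on the suffix at j (exact: 0 ≤ j);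
-- text.find("]", j) is findFrom
def stripB_loop (text : List Char) (i : Nat) : Nat :=
  if (PySem.Chars.startswith (text.drop (stripB_skipWs text i)) "[Date:".toList ||
      PySem.Chars.startswith (text.drop (stripB_skipWs text i)) "[Context:".toList) = false then
    i
  else
    if PySem.Chars.findFrom text "]".toList ((stripB_skipWs text i : Nat) : Int) none = -1 then
      i
    else
      stripB_loop text
        ((PySem.Chars.findFrom text "]".toList ((stripB_skipWs text i : Nat) : Int) none).toNat + 1)
termination_by text.length - i
decreasing_by
  rename_i hsw hk
  have hsw' : (PySem.Chars.startswith (text.drop (stripB_skipWs text i)) "[Date:".toList ||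
      PySem.Chars.startswith (text.drop (stripB_skipWs text i)) "[Context:".toList) ≠ false := hsw
  have hij : i ≤ stripB_skipWs text i := stripB_skipWs_ge text i
  have hjn : stripB_skipWs text i < text.length := by
    by_contra hge
    rw [List.drop_eq_nil_of_le (by omega)] at hsw'
    revert hsw'
    decide
  have hfk := PySem.Chars.findFrom_natCast text "]".toList (stripB_skipWs text i) (by omega)
  rw [hfk] at hk ⊢
  have hneg := PySem.Chars.neg_one_le_find (text.drop (stripB_skipWs text i)) "]".toList
  split at hk
  · omega
  · split
    · omega
    · omega

def strip_query_prefixes_py_alt (text : String) : String :=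
  String.ofList (PySem.Chars.strip
    (PySem.Chars.slice text.toList (some ((stripB_loop text.toList 0 : Nat) : Int)) none))

-- ===== PRECONDITION & SPEC =====
def Spec_strip_query_prefixes_py (text : String) (out : String) : Prop := out = strip_query_prefixes_py_alt text
instance (text : String) (out : String) : Decidable (Spec_strip_query_prefixes_py text out) := by unfold Spec_strip_query_prefixes_py; infer_instance

-- ===== CLAIM (what is proved, stated in full; the proofs are below) =====
def Claim_equal_strip_query_prefixes_py : Prop := ∀ (text : String), Dom_strip_query_prefixes_py text → Spec_strip_query_prefixes_py text (strip_query_prefixes_py text)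

-- ===== LEMMAS AND PROOFS =====

-- the inner whitespace scan computes exactly lstrip on the suffix
theorem skipWs_lstrip (text : List Char) (i : Nat) :
    PySem.Chars.lstrip (text.drop i) = text.drop (stripB_skipWs text i) := by
  fun_induction stripB_skipWs text i with
  | case1 j h hsp ih =>
      rw [List.drop_eq_getElem_cons h]
      show List.dropWhile _ _ = _
      rw [List.dropWhile_cons, if_pos hsp]
      exact ih
  | case2 j h hsp =>
      rw [List.drop_eq_getElem_cons h]
      show List.dropWhile _ _ = _
      rw [List.dropWhile_cons, if_neg (by simpa using hsp)]
  | case3 j h =>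
      rw [List.drop_eq_nil_of_le (by omega)]
      simp [PySem.Chars.lstrip]

-- the two loops agree: A's remaining string is the lstrip of B's cursor suffix
theorem loop_agree (text : List Char) (i : Nat) :
    stripA_loop (text.drop i) = PySem.Chars.lstrip (text.drop (stripB_loop text i)) := by
  fun_induction stripB_loop text i with
  | case1 i hsw =>
      rw [stripA_loop, skipWs_lstrip text i, if_pos hsw]
  | case2 i hsw hk =>
      have hsw' : (PySem.Chars.startswith (text.drop (stripB_skipWs text i)) "[Date:".toList ||
          PySem.Chars.startswith (text.drop (stripB_skipWs text i)) "[Context:".toList) ≠ false := hsw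
      have hjn : stripB_skipWs text i < text.length := by
        by_contra hge
        rw [List.drop_eq_nil_of_le (by omega)] at hsw'
        revert hsw'
        decide
      have hk2 := hk
      rw [PySem.Chars.findFrom_natCast text "]".toList (stripB_skipWs text i) (by omega)] at hk2
      have hneg := PySem.Chars.neg_one_le_find (text.drop (stripB_skipWs text i)) "]".toList
      have he : PySem.Chars.find (text.drop (stripB_skipWs text i)) "]".toList = -1 := by
        by_contra hne
        rw [if_neg hne] at hk2
        omega
      rw [stripA_loop, skipWs_lstrip text i, if_neg hsw, if_pos he]
  | case3 i hsw hk ih =>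
      have hsw' : (PySem.Chars.startswith (text.drop (stripB_skipWs text i)) "[Date:".toList ||
          PySem.Chars.startswith (text.drop (stripB_skipWs text i)) "[Context:".toList) ≠ false := hsw
      have hjn : stripB_skipWs text i < text.length := by
        by_contra hge
        rw [List.drop_eq_nil_of_le (by omega)] at hsw'
        revert hsw'
        decide
      have hfk := PySem.Chars.findFrom_natCast text "]".toList (stripB_skipWs text i) (by omega)
      have hk2 := hk
      rw [hfk] at hk2
      have hneg := PySem.Chars.neg_one_le_find (text.drop (stripB_skipWs text i)) "]".toList
      have he : PySem.Chars.find (text.drop (stripB_skipWs text i)) "]".toList ≠ -1 := by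
        intro h0
        rw [if_pos h0] at hk2
        exact hk2 rfl
      have he0 : 0 ≤ PySem.Chars.find (text.drop (stripB_skipWs text i)) "]".toList := by omega
      rw [stripA_loop, skipWs_lstrip text i, if_neg hsw, if_neg he]
      have hslice : PySem.Chars.slice (text.drop (stripB_skipWs text i))
          (some (PySem.Chars.find (text.drop (stripB_skipWs text i)) "]".toList + 1)) none
          = text.drop ((PySem.Chars.findFrom text "]".toList
              ((stripB_skipWs text i : Nat) : Int) none).toNat + 1) := by
        rw [PySem.Chars.slice_eq_listSlice, PySem.List.slice_from _ (by omega), List.drop_drop,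
          hfk, if_neg he]
        congr 1
        omega
      rw [hslice]
      exact ih

theorem lstrip_idem (l : List Char) :
    PySem.Chars.lstrip (PySem.Chars.lstrip l) = PySem.Chars.lstrip l := by
  induction l with
  | nil => simp [PySem.Chars.lstrip]
  | cons a t ih =>
      by_cases h : PySem.Chars.isspace a
      · simpa [PySem.Chars.lstrip, h] using ih
      · simp [PySem.Chars.lstrip, h]

theorem strip_lstrip (l : List Char) :
    PySem.Chars.strip (PySem.Chars.lstrip l) = PySem.Chars.strip l := by
  show PySem.Chars.rstrip (PySem.Chars.lstrip (PySem.Chars.lstrip l))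
      = PySem.Chars.rstrip (PySem.Chars.lstrip l)
  rw [lstrip_idem]

-- ===== VERDICT (by name: the statement is the Claim_ definition above) =====
theorem strip_query_prefixes_py_spec : Claim_equal_strip_query_prefixes_py := by
  unfold Claim_equal_strip_query_prefixes_py
  intro text _
  unfold Spec_strip_query_prefixes_py strip_query_prefixes_py strip_query_prefixes_py_alt
  have h := loop_agree text.toList 0
  rw [List.drop_zero] at h
  rw [h, strip_lstrip]
  rw [PySem.Chars.slice_eq_listSlice, PySem.List.slice_from_natCast]
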